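-- pv_equiv track=rewrite | github.com/AdamZhouSE/pythonHomework | Code/CodeRecords/2401/60591/249038.py | generate
-- ===== SOURCE A (Python) =====
-- def generate(num):
--     basic = 1
--     res = []
--     result = 1
--     count = 0
--     temp = []
--     while(result < num):
--         result += basic
--         basic *= 2
--     num = result
--     result = 1
--     basic = 1
--     for x in range(num):
--         if(x < result):
--             temp.append(x + 1)
--         else:
--             basic *= 2
--             result += basic
--             if(count == 0):
--                 count = 1
--                 temp.reverse()
--             else:
--                 count = 0
--             for n in temp:
--                 res.append(n)
--             temp = [x+1]
--     for n in temp: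
--         res.append(n)
--     return res
-- ===== SOURCE B (Python) =====
-- def generate(num):
--     n = 1
--     while n < num:
--         n *= 2
--     res = []
--     val = 1
--     k = 0
--     while val < n:
--         block = list(range(val, 2 * val))
--         if k % 2 == 0:
--             block.reverse()
--         res.extend(block)
--         val *= 2
--         k += 1
--     res.append(n)
--     return res
-- ===== Notes on version B (the rewrite author's own statement) =====
-- stated objective: simpler
-- what changed: B first rounds num up to a power of two by doubling, then emits the output block by block (each block is range(val, 2*val), reversed for even block index) instead of A's element-wise loop over every index with a temp buffer, running thresholds and a count toggle.
import Mathlib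
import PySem

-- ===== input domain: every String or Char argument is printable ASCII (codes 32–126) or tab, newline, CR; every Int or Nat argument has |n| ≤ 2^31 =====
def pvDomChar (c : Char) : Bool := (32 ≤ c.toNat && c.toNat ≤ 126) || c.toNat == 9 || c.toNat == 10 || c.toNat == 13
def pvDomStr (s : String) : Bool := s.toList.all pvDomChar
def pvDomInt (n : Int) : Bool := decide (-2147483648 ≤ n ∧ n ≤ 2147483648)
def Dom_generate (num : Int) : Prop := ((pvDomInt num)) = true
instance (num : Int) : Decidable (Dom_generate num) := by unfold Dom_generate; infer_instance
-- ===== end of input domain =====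

-- B replaces A's element-wise loop (temp buffer, running thresholds, count toggle) by a
-- block-wise emission of the same sequence; objective: simpler, same O(n) cost.

-- ===== PORT A =====
-- A's 'while result < num: result += basic; basic *= 2'.  The fuel argument only makes the
-- recursion structural: result grows by basic ≥ 1 each pass, so (num - 1).toNat passes
-- always suffice and the loop exits on its own condition.
def generateRoundLoop (num : Int) (fuel : Nat) (result basic : Int) : Int :=
  match fuel with
  | 0 => result
  | f + 1 => if result < num then generateRoundLoop num f (result + basic) (basic * 2) else result

-- one iteration of A's 'for x in range(num)' body; state = (basic, result, count, temp, res).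
-- Python's lists temp/res are ported as Array Int (a Python list is a dynamic array;
-- .append = .push, .reverse = .reverse, extend = ++), exact element for element.
def generateStep (s : Int × Int × Int × Array Int × Array Int) (x : Int) :
    Int × Int × Int × Array Int × Array Int :=
  match s with
  | (basic, result, count, temp, res) =>
    if x < result then (basic, result, count, temp.push (x + 1), res)
    else
      let basic := basic * 2
      let result := result + basic
      if count == 0 then (basic, result, 1, #[x + 1], res ++ temp.reverse)
      else (basic, result, 0, #[x + 1], res ++ temp)

def generate (num : Int) : List Int :=
  let n := generateRoundLoop num (num - 1).toNat 1 1
  let s := (PySem.List.pyRange 0 n 1).foldl generateStep (1, 1, 0, #[], #[])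
  (s.2.2.2.2 ++ s.2.2.2.1).toList    -- res after the final 'for n in temp: res.append(n)'

-- ===== PORT B =====
-- B's 'while n < num: n *= 2'; fuel only for structural totality, as above.
def generateAltRoundLoop (num : Int) (fuel : Nat) (n : Int) : Int :=
  match fuel with
  | 0 => n
  | f + 1 => if n < num then generateAltRoundLoop num f (n * 2) else n

-- B's block loop: while val < n, emit range(val, 2*val), reversed for even k;
-- fuel (n - 1).toNat covers the ≤ log2 n doublings.
def generateAltLoop (n : Int) (fuel : Nat) (res : List Int) (val k : Int) : List Int :=
  match fuel with
  | 0 => res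
  | f + 1 =>
    if val < n then
      generateAltLoop n f
        (res ++ (if k % 2 == 0 then (PySem.List.pyRange val (2 * val) 1).reverse
                 else PySem.List.pyRange val (2 * val) 1))
        (val * 2) (k + 1)
    else res

def generate_alt (num : Int) : List Int :=
  let n := generateAltRoundLoop num (num - 1).toNat 1
  generateAltLoop n (n - 1).toNat [] 1 0 ++ [n]

-- ===== PRECONDITION & SPEC =====
def Spec_generate (num : Int) (out : List Int) : Prop := out = generate_alt num
instance (num : Int) (out : List Int) : Decidable (Spec_generate num out) := by unfold Spec_generate; infer_instance

-- ===== CLAIM (what is proved, stated in full; the proofs are below) =====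
def Claim_equal_generate : Prop := ∀ (num : Int), Dom_generate num → Spec_generate num (generate num)

-- ===== LEMMAS AND PROOFS =====

-- A's rounding loop keeps result = basic, so it is B's doubling loop
theorem roundAB (num : Int) (fuel : Nat) : ∀ (r : Int),
    generateRoundLoop num fuel r r = generateAltRoundLoop num fuel r := by
  induction fuel with
  | zero => intro r; rfl
  | succ f ih =>
    intro r
    simp only [generateRoundLoop, generateAltRoundLoop]
    split
    · rw [show r + r = r * 2 from by ring]; exact ih (r * 2)
    · rfl

-- B's rounding from a power of two reaches a power of two
theorem round_pow (num : Int) (fuel : Nat) : ∀ (j : Nat),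
    ∃ m : Nat, generateAltRoundLoop num fuel (2 ^ j) = 2 ^ m := by
  induction fuel with
  | zero => intro j; exact ⟨j, rfl⟩
  | succ f ih =>
    intro j
    simp only [generateAltRoundLoop]
    split
    · rw [show (2:Int) ^ j * 2 = 2 ^ (j + 1) from by ring]; exact ih (j + 1)
    · exact ⟨j, rfl⟩

-- the j-th block of the output, and the concatenation of the first m blocks
def block (j : Nat) : List Int :=
  if j % 2 == 0 then (PySem.List.pyRange (2 ^ j) (2 ^ (j + 1)) 1).reverse
  else PySem.List.pyRange (2 ^ j) (2 ^ (j + 1)) 1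

def blocks : Nat → List Int
  | 0 => []
  | m + 1 => blocks m ++ block m

theorem pyRange_map_add_one (a b : Int) :
    (PySem.List.pyRange a b 1).map (fun x => x + 1) = PySem.List.pyRange (a + 1) (b + 1) 1 := by
  rw [PySem.List.pyRange_one, PySem.List.pyRange_one, List.map_map,
    show b + 1 - (a + 1) = b - a from by ring]
  congr 1; funext k; simp; ring

-- a run of elements all below the threshold only appends to temp
theorem foldl_step_lt (l : List Int) (basic result count : Int) (temp res : Array Int)
    (h : ∀ x ∈ l, x < result) :
    l.foldl generateStep (basic, result, count, temp, res)
      = (basic, result, count, temp ++ (l.map (fun x => x + 1)).toArray, res) := by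
  induction l generalizing temp with
  | nil => simp
  | cons a t ih =>
    simp only [List.foldl_cons, generateStep]
    rw [if_pos (h a (by simp))]
    rw [ih (temp.push (a + 1)) (fun x hx => h x (by simp [hx]))]
    refine Prod.ext rfl (Prod.ext rfl (Prod.ext rfl (Prod.ext ?_ rfl)))
    rw [← Array.toList_inj]
    simp

-- characterisation of A's fold over range(2^m)
theorem foldA (m : Nat) :
    (PySem.List.pyRange 0 (2 ^ m) 1).foldl generateStep (1, 1, 0, #[], #[])
      = ((2:Int) ^ m, 2 ^ (m + 1) - 1, ((m % 2 : Nat) : Int), #[(2:Int) ^ m],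
        (blocks m).toArray) := by
  induction m with
  | zero => decide
  | succ m ih =>
    have hpos : (0:Int) < 2 ^ m := by positivity
    have hlt : (2:Int) ^ m < 2 ^ (m + 1) := by rw [pow_succ]; omega
    have hsplit : PySem.List.pyRange 0 (2 ^ (m + 1)) 1
        = PySem.List.pyRange 0 (2 ^ m) 1
          ++ (PySem.List.pyRange (2 ^ m) (2 ^ (m + 1) - 1) 1 ++ [2 ^ (m + 1) - 1]) := by
      rw [PySem.List.pyRange_one_append 0 (2 ^ m) (2 ^ (m + 1)) (by omega) (by omega)]
      congr 1
      conv_lhs => rw [show (2:Int) ^ (m + 1) = (2 ^ (m + 1) - 1) + 1 from by ring]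
      exact PySem.List.pyRange_one_succ_right (by omega)
    rw [hsplit, List.foldl_append, List.foldl_append, ih]
    rw [foldl_step_lt (PySem.List.pyRange (2 ^ m) (2 ^ (m + 1) - 1) 1) _ _ _ _ _ (by
      intro x hx
      rw [PySem.List.mem_pyRange_one] at hx
      omega)]
    rw [pyRange_map_add_one]
    have htemp : #[(2:Int) ^ m] ++ (PySem.List.pyRange (2 ^ m + 1) (2 ^ (m + 1) - 1 + 1) 1).toArray
        = (PySem.List.pyRange (2 ^ m) (2 ^ (m + 1)) 1).toArray := by
      rw [← Array.toList_inj]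
      simp only [Array.toList_append]
      rw [show (2:Int) ^ (m + 1) - 1 + 1 = 2 ^ (m + 1) from by ring,
        PySem.List.pyRange_one_cons hlt]
      simp
    rw [htemp]
    simp only [List.foldl_cons, List.foldl_nil, generateStep]
    rw [if_neg (by omega)]
    rcases Nat.even_or_odd m with he | ho
    · have h2 : m % 2 = 0 := Nat.even_iff.mp he
      have h3 : (m + 1) % 2 = 1 := by omega
      rw [if_pos (by simp [h2])]
      simp only [h3]
      refine Prod.ext (by ring) (Prod.ext (by ring) (Prod.ext (by norm_num) (Prod.ext ?_ ?_)))
      · simp only []; rw [show (2:Int) ^ (m + 1) - 1 + 1 = 2 ^ (m + 1) from by ring]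
      · rw [← Array.toList_inj]; simp [blocks, block, h2]
    · have h2 : m % 2 = 1 := Nat.odd_iff.mp ho
      have h3 : (m + 1) % 2 = 0 := by omega
      rw [if_neg (by simp [h2])]
      simp only [h3]
      refine Prod.ext (by ring) (Prod.ext (by ring) (Prod.ext (by norm_num) (Prod.ext ?_ ?_)))
      · simp only []; rw [show (2:Int) ^ (m + 1) - 1 + 1 = 2 ^ (m + 1) from by ring]
      · rw [← Array.toList_inj]; simp [blocks, block, h2]

-- the blocks emitted by B's loop from block j for d more doublings
def segs : Nat → Nat → List Int
  | _, 0 => []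
  | j, d + 1 => block j ++ segs (j + 1) d

theorem loopB (d : Nat) : ∀ (j : Nat) (res : List Int) (fuel : Nat), d ≤ fuel →
    generateAltLoop (2 ^ (j + d)) fuel res (2 ^ j) (j : Int) = res ++ segs j d := by
  induction d with
  | zero =>
    intro j res fuel _
    match fuel with
    | 0 => simp [generateAltLoop, segs]
    | f + 1 =>
      rw [generateAltLoop, if_neg (by simp)]
      simp [segs]
  | succ d ih =>
    intro j res fuel hfuel
    match fuel with
    | f + 1 =>
      have hlt : (2:Int) ^ j < 2 ^ (j + (d + 1)) := by
        have h1 : (2:Int) ^ (j + (d + 1)) = 2 ^ j * 2 ^ (d + 1) := pow_add 2 j (d + 1)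
        have h2 : (2:Int) ≤ 2 ^ (d + 1) := by
          calc (2:Int) = 2 ^ 1 := (pow_one 2).symm
            _ ≤ 2 ^ (d + 1) := pow_le_pow_right₀ (by norm_num) (by omega)
        have hp : (0:Int) < 2 ^ j := by positivity
        nlinarith
      rw [generateAltLoop, if_pos hlt]
      have hblock : (if (j : Int) % 2 == 0 then (PySem.List.pyRange (2 ^ j) (2 * 2 ^ j) 1).reverse
          else PySem.List.pyRange (2 ^ j) (2 * 2 ^ j) 1) = block j := by
        rw [block, show (2:Int) * 2 ^ j = 2 ^ (j + 1) from by ring]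
        rcases Nat.even_or_odd j with he | ho
        · have h2 : j % 2 = 0 := Nat.even_iff.mp he
          have h4 : (j : Int) % 2 = 0 := by omega
          simp [h2, h4]
        · have h2 : j % 2 = 1 := Nat.odd_iff.mp ho
          have h4 : (j : Int) % 2 = 1 := by omega
          simp [h2, h4]
      rw [hblock, show (2:Int) ^ j * 2 = 2 ^ (j + 1) from by ring,
        show ((j : Int) + 1) = ((j + 1 : Nat) : Int) from by push_cast; ring,
        show j + (d + 1) = (j + 1) + d from by omega,
        ih (j + 1) (res ++ block j) f (by omega)]
      simp [segs]

theorem segs_snoc (d : Nat) : ∀ j, segs j (d + 1) = segs j d ++ block (j + d) := by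
  induction d with
  | zero => intro j; simp [segs]
  | succ d ih =>
    intro j
    show block j ++ segs (j + 1) (d + 1) = segs j (d + 1) ++ block (j + (d + 1))
    rw [ih (j + 1)]
    simp [segs, show j + 1 + d = j + (d + 1) from by omega]

theorem segs_zero (m : Nat) : segs 0 m = blocks m := by
  induction m with
  | zero => rfl
  | succ m ih => rw [segs_snoc, ih]; simp [blocks]

-- ===== VERDICT (by name: the statement is the Claim_ definition above) =====
theorem generate_spec : Claim_equal_generate := by
  intro num _
  unfold Spec_generate generate generate_alt
  obtain ⟨m, hm⟩ := round_pow num (num - 1).toNat 0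
  rw [pow_zero] at hm
  have hround : generateRoundLoop num (num - 1).toNat 1 1 = 2 ^ m := by
    rw [roundAB num (num - 1).toNat 1, hm]
  have hfuel : m ≤ ((2:Int) ^ m - 1).toNat := by
    have h1 : (2:Int) ^ m = ((2 ^ m : Nat) : Int) := by push_cast; ring
    have h2 : m < 2 ^ m := Nat.lt_two_pow_self
    omega
  have hb : generateAltLoop ((2:Int) ^ m) ((2:Int) ^ m - 1).toNat [] 1 0 = blocks m := by
    have h0 := loopB m 0 [] ((2:Int) ^ m - 1).toNat hfuel
    simp only [Nat.zero_add, List.nil_append, pow_zero, Nat.cast_zero] at h0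
    rw [← segs_zero m, ← h0]
  simp only [hround, hm, foldA, hb]
  simp
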